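-- pv_equiv track=rewrite | github.com/kankang20/Baekjoon | 02 백준/10 문자열/Python/Prob4659.py | check_sameword
-- ===== SOURCE A (Python) =====
-- def check_sameword(password):
--
--     idx = 0
--
--     while idx < len(password)-1:
--
--         temp = password[idx]
--         idx += 1
--
--         if temp in ['e', 'o']:
--             continue
--
--         if temp == password[idx]:
--             return False
--
--     return True
-- ===== SOURCE B (Python) =====
-- def check_sameword(password):
--     # Stage 1: run-length encode the string into (char, run_length) pairs.
--     runs = []
--     prev = None
--     cnt = 0
--     for c in password:
--         if c == prev:
--             cnt += 1
--         else:
--             if cnt: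
--                 runs.append((prev, cnt))
--             prev, cnt = c, 1
--     if cnt:
--         runs.append((prev, cnt))
--     # Stage 2: a repeated letter is a run of length >= 2; only 'e'/'o' may repeat.
--     return all(ch in 'eo' or n < 2 for ch, n in runs)
-- ===== Notes on version B (the rewrite author's own statement) =====
-- stated objective: alternative
-- what changed: Replaces A's adjacent-pair index scan with a two-stage run-length encoding: first compress the string into (char, run length) pairs, then check that every run of length >= 2 has character 'e' or 'o'.
import Mathlib
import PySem

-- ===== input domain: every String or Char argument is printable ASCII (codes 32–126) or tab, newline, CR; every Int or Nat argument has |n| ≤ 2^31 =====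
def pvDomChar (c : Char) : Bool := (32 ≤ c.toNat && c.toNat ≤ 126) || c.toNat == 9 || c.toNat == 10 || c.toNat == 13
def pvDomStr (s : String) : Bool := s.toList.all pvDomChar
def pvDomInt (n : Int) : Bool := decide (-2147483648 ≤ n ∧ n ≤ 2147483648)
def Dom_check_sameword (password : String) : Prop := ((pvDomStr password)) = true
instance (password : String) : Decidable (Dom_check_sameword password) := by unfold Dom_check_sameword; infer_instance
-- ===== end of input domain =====

-- B replaces A's adjacent-pair index scan with a two-stage run-length encoding
-- (compress into (char, run length) pairs, then check the runs); alternative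
-- decomposition, same O(n) cost, return value only.

-- ===== PORT A =====
-- while loop: idx advances by 1 each iteration; indices are always in range, so getD's
-- default is never used (password[idx] with 0 ≤ idx < len never raises here).
def checkAuxA (cs : List Char) (idx : Nat) : Bool :=
  if idx < cs.length - 1 then
    let temp := cs.getD idx ' '
    let idx' := idx + 1
    if temp = 'e' ∨ temp = 'o' then checkAuxA cs idx'
    else if temp = cs.getD idx' ' ' then false
    else checkAuxA cs idx'
  else true
  termination_by cs.length - 1 - idx

def check_sameword (password : String) : Bool := checkAuxA password.toList 0

-- ===== PORT B =====
-- Stage 1 of Source B: the for-loop carrying (runs, prev, cnt); prev = None ↦ none.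
def runStepB (st : List (Char × Nat) × Option Char × Nat) (c : Char) :
    List (Char × Nat) × Option Char × Nat :=
  let (runs, prev, cnt) := st
  if some c = prev then (runs, prev, cnt + 1)
  else ((if cnt ≠ 0 then runs ++ [(prev.getD ' ', cnt)] else runs), some c, 1)

def runsB (cs : List Char) : List (Char × Nat) :=
  let st := cs.foldl runStepB ([], none, 0)
  if st.2.2 ≠ 0 then st.1 ++ [(st.2.1.getD ' ', st.2.2)] else st.1

def check_sameword_alt (password : String) : Bool :=
  (runsB password.toList).all (fun p => p.1 == 'e' || p.1 == 'o' || decide (p.2 < 2))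

-- ===== PRECONDITION & SPEC =====
def Spec_check_sameword (password : String) (out : Bool) : Prop := out = check_sameword_alt password
instance (password : String) (out : Bool) : Decidable (Spec_check_sameword password out) := by unfold Spec_check_sameword; infer_instance

-- ===== CLAIM (what is proved, stated in full; the proofs are below) =====
def Claim_equal_check_sameword : Prop := ∀ (password : String), Dom_check_sameword password → Spec_check_sameword password (check_sameword password)

-- ===== LEMMAS AND PROOFS =====

-- Reference run-length encoding, built back-to-front (proof-only helper).
def runsR (cs : List Char) : List (Char × Nat) :=
  cs.foldr (fun c acc =>
    match acc with
    | (d, m) :: t => if c = d then (d, m + 1) :: t else (c, 1) :: (d, m) :: t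
    | [] => [(c, 1)]) []

-- merge a pending run (p, k) onto the front of a run list
def mergeRun (p : Char) (k : Nat) (rr : List (Char × Nat)) : List (Char × Nat) :=
  match rr with
  | (d, m) :: t => if p = d then (d, m + k) :: t else (p, k) :: (d, m) :: t
  | [] => [(p, k)]

theorem runsR_cons (c : Char) (cs : List Char) :
    runsR (c :: cs) = mergeRun c 1 (runsR cs) := by
  simp only [runsR, List.foldr_cons, mergeRun]

theorem runsR_head (d : Char) (cs : List Char) :
    ∃ n t, runsR (d :: cs) = (d, n) :: t ∧ 1 ≤ n := by
  induction cs generalizing d with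
  | nil => exact ⟨1, [], rfl, le_rfl⟩
  | cons e r ih =>
    obtain ⟨n, t, h, hn⟩ := ih e
    rw [runsR_cons, h, mergeRun]
    by_cases hde : d = e
    · subst hde; exact ⟨n + 1, t, by simp, by omega⟩
    · exact ⟨1, (e, n) :: t, by simp [hde], le_rfl⟩

-- the foldl of B, with a pending run, flushes to runsR
theorem foldl_runStepB (cs : List Char) (rs : List (Char × Nat)) (p : Char) (n : Nat) :
    (let st := cs.foldl runStepB (rs, some p, n + 1)
     if st.2.2 ≠ 0 then st.1 ++ [(st.2.1.getD ' ', st.2.2)] else st.1)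
      = rs ++ mergeRun p (n + 1) (runsR cs) := by
  induction cs generalizing rs p n with
  | nil => simp [mergeRun, runsR]
  | cons c cs' ih =>
    by_cases hcp : c = p
    · subst hcp
      rw [List.foldl_cons]
      have hs : runStepB (rs, some c, n + 1) c = (rs, some c, n + 2) := by
        simp [runStepB]
      rw [hs, ih]
      congr 1
      rw [runsR_cons]
      cases hr : runsR cs' with
      | nil => simp [mergeRun]; omega
      | cons hd t =>
        obtain ⟨d, m⟩ := hd
        by_cases hcd : c = d
        · subst hcd; simp [mergeRun]; omega
        · simp [mergeRun, hcd]; omega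
    · rw [List.foldl_cons]
      have hs : runStepB (rs, some p, n + 1) c = (rs ++ [(p, n + 1)], some c, 1) := by
        simp [runStepB, hcp]
      rw [hs, ih, runsR_cons]
      have : mergeRun p (n + 1) (mergeRun c 1 (runsR cs'))
          = (p, n + 1) :: mergeRun c 1 (runsR cs') := by
        have hpc : ¬ p = c := fun h => hcp h.symm
        cases hr : runsR cs' with
        | nil => simp [mergeRun, hpc]
        | cons hd t =>
          obtain ⟨d, m⟩ := hd
          by_cases hcd : c = d
          · subst hcd; simp [mergeRun, hpc]
          · simp [mergeRun, hcd, hpc]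
      simp [this]

theorem runsB_eq_runsR (cs : List Char) : runsB cs = runsR cs := by
  cases cs with
  | nil => rfl
  | cons c cs' =>
    unfold runsB
    rw [List.foldl_cons]
    have hs : runStepB ([], none, 0) c = ([], some c, 1) := by simp [runStepB]
    rw [hs]
    have := foldl_runStepB cs' [] c 0
    simp only at this
    rw [this, runsR_cons]
    simp

-- pairwise characterisation shared by both sides
def pairAll (cs : List Char) : Bool :=
  (cs.zip cs.tail).all (fun p => p.1 == 'e' || p.1 == 'o' || p.1 != p.2)

theorem checkAuxA_eq_pairAll (cs : List Char) (idx : Nat) :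
    checkAuxA cs idx =
      ((cs.drop idx).zip (cs.drop idx).tail).all
        (fun p => p.1 == 'e' || p.1 == 'o' || p.1 != p.2) := by
  have key : ∀ (n idx : Nat), cs.length - idx ≤ n →
      checkAuxA cs idx =
        ((cs.drop idx).zip (cs.drop idx).tail).all
          (fun p => p.1 == 'e' || p.1 == 'o' || p.1 != p.2) := by
    intro n
    induction n with
    | zero =>
      intro idx hn
      rw [checkAuxA, if_neg (by omega)]
      have hd : cs.drop idx = [] := List.drop_eq_nil_of_le (by omega)
      simp [hd]
    | succ n ih =>
      intro idx hn
      by_cases hlt : idx < cs.length - 1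
      · have h1 : idx < cs.length := by omega
        have h2 : idx + 1 < cs.length := by omega
        have hd1 : cs.drop idx = cs[idx] :: cs.drop (idx + 1) :=
          List.drop_eq_getElem_cons h1
        have hd2 : cs.drop (idx + 1) = cs[idx + 1] :: cs.drop (idx + 2) :=
          List.drop_eq_getElem_cons h2
        have hg1 : cs.getD idx ' ' = cs[idx] := List.getD_eq_getElem cs ' ' h1
        have hg2 : cs.getD (idx + 1) ' ' = cs[idx + 1] := List.getD_eq_getElem cs ' ' h2
        rw [checkAuxA, if_pos hlt]
        simp only [hg1, hg2]
        rw [hd1]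
        conv_rhs => rw [hd2]
        simp only [List.tail_cons, List.zip_cons_cons, List.all_cons]
        rw [ih (idx + 1) (by omega)]
        by_cases heo : cs[idx] = 'e' ∨ cs[idx] = 'o'
        · rw [if_pos heo]
          rcases heo with he | ho
          · simp [he]
          · simp [ho]
        · rw [if_neg heo]
          rw [not_or] at heo
          by_cases heq : cs[idx] = cs[idx + 1]
          · rw [if_pos heq]
            have hf : (cs[idx] == 'e' || cs[idx] == 'o' || cs[idx] != cs[idx + 1]) = false := by
              simp [heo.1, heo.2]
              exact heq
            simp [hf]
          · rw [if_neg heq]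
            simp [heq, heo.1, heo.2]
      · rw [checkAuxA, if_neg hlt]
        have htl : (cs.drop idx).tail = [] := by
          cases hd : cs.drop idx with
          | nil => rfl
          | cons a t =>
            have : (cs.drop idx).length = cs.length - idx := List.length_drop ..
            rw [hd] at this
            simp only [List.length_cons] at this
            have : t.length = 0 := by omega
            simpa using List.length_eq_zero_iff.mp this
        simp [htl]
  exact key (cs.length - idx) idx le_rfl

theorem runsR_all_eq_pairAll (cs : List Char) :
    (runsR cs).all (fun p => p.1 == 'e' || p.1 == 'o' || decide (p.2 < 2)) = pairAll cs := by
  induction cs with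
  | nil => rfl
  | cons c cs' ih =>
    cases cs' with
    | nil => simp [runsR, pairAll]
    | cons d r =>
      obtain ⟨n, t, hh, hn1⟩ := runsR_head d r
      rw [runsR_cons, hh, mergeRun]
      have hrhs : pairAll (c :: d :: r)
          = ((c == 'e' || c == 'o' || c != d) && pairAll (d :: r)) := by
        simp [pairAll]
      rw [hrhs, ← ih, hh]
      by_cases hcd : c = d
      · subst hcd
        simp only [List.all_cons]
        by_cases heo : c = 'e' ∨ c = 'o'
        · rcases heo with he | ho
          · subst he; simp
          · subst ho; simp
        · have hn0 : ¬ n = 0 := by omega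
          cases h : (c == 'e' || c == 'o') <;> simp [h, hn0]
      · rw [if_neg hcd]
        simp [List.all_cons, hcd]

-- ===== VERDICT (by name: the statement is the Claim_ definition above) =====
theorem check_sameword_spec : Claim_equal_check_sameword := by
  intro password _
  unfold Spec_check_sameword check_sameword check_sameword_alt
  rw [runsB_eq_runsR, runsR_all_eq_pairAll]
  simpa [pairAll] using checkAuxA_eq_pairAll password.toList 0
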